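-- pv_equiv track=rewrite | github.com/ZGoriely/cambridge-nlp | src/svm.py | getDocumentVector
-- ===== SOURCE A (Python) =====
-- def getDocumentVector(wordList, wordMap, unigrams=True, bigrams=False, presence=False):
--
--     unigramMap, bigramMap = wordMap
--
--     docVec = []
--     wordCount = {}
--
--     # Create the word vector as a dictionary
--     if (unigrams):
--         for unigram in wordList:
--             if not unigram in unigramMap: continue # If don't recognise word
--             fid = unigramMap[unigram]
--             if presence: wordCount[fid] = 1
--             else:        wordCount[fid] = 1 if not (fid in wordCount) else wordCount[fid] + 1
--     if (bigrams):
--         for bigram in zip(wordList[:-1], wordList[1:]):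
--             if not bigram in bigramMap: continue
--             fid = bigramMap[bigram]
--             if presence: wordCount[fid] = 1
--             else:        wordCount[fid] = 1 if not (fid in wordCount) else wordCount[fid] + 1
--
--     # Convert the word vector to a list of (wordID, count) pairs
--     for wordID, count in wordCount.items():
--         docVec.append((wordID, count))
--     list.sort(docVec)
--     return docVec
-- ===== SOURCE B (Python) =====
-- def getDocumentVector(wordList, wordMap, unigrams=True, bigrams=False, presence=False):
--     unigramMap, bigramMap = wordMap
--     # collect recognised feature ids into one flat list
--     ids = []
--     if unigrams:
--         ids += [unigramMap[w] for w in wordList if w in unigramMap]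
--     if bigrams:
--         ids += [bigramMap[b] for b in zip(wordList, wordList[1:]) if b in bigramMap]
--     # sort first, then group equal consecutive ids in a single linear pass
--     ids.sort()
--     docVec = []
--     for fid in ids:
--         if docVec and docVec[-1][0] == fid:
--             if not presence:
--                 docVec[-1] = (fid, docVec[-1][1] + 1)
--         else:
--             docVec.append((fid, 1))
--     return docVec
-- ===== Notes on version B (the rewrite author's own statement) =====
-- stated objective: alternative
-- what changed: Replaces A's dict-accumulation (tally counts/presence into a dict keyed by feature id, then extract items and sort the pairs) by sort-first-then-group: the flat list of recognised ids is sorted and a single linear pass groups equal consecutive ids into (id, run_length) pairs (run length capped at 1 in presence mode); no dict or set is used.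
import Mathlib
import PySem

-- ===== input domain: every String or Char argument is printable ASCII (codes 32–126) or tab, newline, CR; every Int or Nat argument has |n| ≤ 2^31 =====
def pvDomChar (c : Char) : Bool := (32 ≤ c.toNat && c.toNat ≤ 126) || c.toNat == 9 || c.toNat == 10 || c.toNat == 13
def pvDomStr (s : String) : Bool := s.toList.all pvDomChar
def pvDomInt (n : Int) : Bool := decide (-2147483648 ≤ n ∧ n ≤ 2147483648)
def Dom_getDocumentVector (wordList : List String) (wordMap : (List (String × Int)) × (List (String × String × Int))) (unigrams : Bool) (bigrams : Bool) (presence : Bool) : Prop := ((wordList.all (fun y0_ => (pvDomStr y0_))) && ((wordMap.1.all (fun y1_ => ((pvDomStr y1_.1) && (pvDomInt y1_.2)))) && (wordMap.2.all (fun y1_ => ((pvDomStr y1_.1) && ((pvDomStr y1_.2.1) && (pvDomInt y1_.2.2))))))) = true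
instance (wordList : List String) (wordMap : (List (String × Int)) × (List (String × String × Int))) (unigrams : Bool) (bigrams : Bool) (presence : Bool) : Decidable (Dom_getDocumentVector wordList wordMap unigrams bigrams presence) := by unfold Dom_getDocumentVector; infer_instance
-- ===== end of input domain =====

-- B replaces A's dict tallying with sort-first-then-group: sort the flat recognised-id list, then one linear pass grouping equal consecutive ids into (id, run length) pairs (alternative decomposition, same results).


-- ===== PORT A =====
-- dict subscript / membership on the association-list encoding: first match
def pyLookupU (m : List (String × Int)) (w : String) : Option Int :=
  (m.find? (fun e => e.1 == w)).map (·.2)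

def pyLookupB (m : List (String × String × Int)) (b : String × String) : Option Int :=
  (m.find? (fun e => (e.1, e.2.1) == b)).map (·.2.2)

def getDocumentVector (wordList : List String) (wordMap : (List (String × Int)) × (List (String × String × Int))) (unigrams : Bool) (bigrams : Bool) (presence : Bool) : List (Int × Int) :=
  let unigramMap := wordMap.1
  let bigramMap := wordMap.2
  let wordCount0 : PySem.Dict Int Int := PySem.Dict.empty
  let wordCount1 :=
    if unigrams then
      wordList.foldl (fun wc unigram =>
        match pyLookupU unigramMap unigram with
        | none => wc                           -- continue: word not recognised
        | some fid =>
          if presence then wc.insert fid 1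
          else wc.modify fid 0 (· + 1)) wordCount0
    else wordCount0
  let wordCount2 :=
    if bigrams then
      ((PySem.List.slice wordList none (some (-1))).zip
        (PySem.List.slice wordList (some 1) none)).foldl (fun wc bigram =>
        match pyLookupB bigramMap bigram with
        | none => wc
        | some fid =>
          if presence then wc.insert fid 1
          else wc.modify fid 0 (· + 1)) wordCount1
    else wordCount1
  let docVec := wordCount2.items.foldl (fun acc p => acc ++ [p]) []
  PySem.List.sorted2 docVec (·.1) (·.2)

-- ===== PORT B =====
-- the body of B's grouping loop: compare against the last emitted pair, extend its run or open a new one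
def stepGroup (presence : Bool) (docVec : List (Int × Int)) (fid : Int) : List (Int × Int) :=
  match docVec.getLast? with
  | some p =>
    if p.1 == fid then
      (if presence then docVec else docVec.dropLast ++ [(fid, p.2 + 1)])
    else docVec ++ [(fid, 1)]
  | none => docVec ++ [(fid, 1)]

def getDocumentVector_alt (wordList : List String) (wordMap : (List (String × Int)) × (List (String × String × Int))) (unigrams : Bool) (bigrams : Bool) (presence : Bool) : List (Int × Int) :=
  let ids :=
    (if unigrams then wordList.filterMap (pyLookupU wordMap.1) else []) ++
    (if bigrams then
      (wordList.zip (PySem.List.slice wordList (some 1) none)).filterMap (pyLookupB wordMap.2)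
     else [])
  let sIds := PySem.List.sorted ids (fun x => x) false
  sIds.foldl (stepGroup presence) []

-- ===== PRECONDITION & SPEC =====
def Spec_getDocumentVector (wordList : List String) (wordMap : (List (String × Int)) × (List (String × String × Int))) (unigrams : Bool) (bigrams : Bool) (presence : Bool) (out : List (Int × Int)) : Prop := out = getDocumentVector_alt wordList wordMap unigrams bigrams presence
instance (wordList : List String) (wordMap : (List (String × Int)) × (List (String × String × Int))) (unigrams : Bool) (bigrams : Bool) (presence : Bool) (out : List (Int × Int)) : Decidable (Spec_getDocumentVector wordList wordMap unigrams bigrams presence out) := by unfold Spec_getDocumentVector; infer_instance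

-- ===== CLAIM (what is proved, stated in full; the proofs are below) =====
def Claim_equal_getDocumentVector : Prop := ∀ (wordList : List String) (wordMap : (List (String × Int)) × (List (String × String × Int))) (unigrams : Bool) (bigrams : Bool) (presence : Bool), Dom_getDocumentVector wordList wordMap unigrams bigrams presence → Spec_getDocumentVector wordList wordMap unigrams bigrams presence (getDocumentVector wordList wordMap unigrams bigrams presence)

-- ===== LEMMAS AND PROOFS =====

------------------------------------------------------------------ A-side

lemma insertBy_congr {α : Type} (f g : α → α → Bool) (x : α) (ys : List α)
    (h : ∀ y ∈ ys, f x y = g x y) :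
    PySem.List.insertBy f x ys = PySem.List.insertBy g x ys := by
  induction ys with
  | nil => rfl
  | cons y ys ih =>
    simp only [PySem.List.insertBy]
    rw [h y (by simp)]
    by_cases hg : g x y = true
    · simp [hg]
    · simp only [Bool.not_eq_true] at hg
      simp [hg, ih (fun z hz => h z (by simp [hz]))]

lemma foldl_insertBy_congr {α : Type} (f g : α → α → Bool) (l : List α) :
    ∀ acc : List α, (∀ a ∈ l, ∀ b, (b ∈ acc ∨ b ∈ l) → f a b = g a b) →
    l.foldl (fun acc x => PySem.List.insertBy f x acc) acc
      = l.foldl (fun acc x => PySem.List.insertBy g x acc) acc := by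
  induction l with
  | nil => intro acc _; rfl
  | cons x l ih =>
    intro acc h
    simp only [List.foldl_cons]
    rw [insertBy_congr f g x acc (fun y hy => h x (by simp) y (Or.inl hy))]
    exact ih _ (fun a ha b hb => h a (by simp [ha]) b (by
      rcases hb with hb | hb
      · rcases (PySem.List.mem_insertBy g x b acc).1 hb with rfl | hb
        · exact Or.inr (by simp)
        · exact Or.inl hb
      · exact Or.inr (by simp [hb])))

-- sorting id-keyed pairs whose second component is a function of the first
lemma sorted2_map_set (ids : List Int) (v : Int → Int) :
    PySem.List.sorted2 ((PySem.Set.ofList ids).map (fun k => (k, v k))) (·.1) (·.2)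
      = (PySem.List.sorted (PySem.Set.ofList ids) (fun x => x) false).map (fun k => (k, v k)) := by
  have hstep : PySem.List.sorted2 ((PySem.Set.ofList ids).map (fun k => (k, v k))) (·.1) (·.2)
      = PySem.List.sorted ((PySem.Set.ofList ids).map (fun k => (k, v k))) (·.1) false := by
    simp only [PySem.List.sorted2, PySem.List.sorted]
    apply foldl_insertBy_congr
    intro a ha b hb
    simp only [List.mem_map] at ha
    obtain ⟨ka, _, rfl⟩ := ha
    have hb' : b ∈ ((PySem.Set.ofList ids).map (fun k => (k, v k)) : List (Int × Int)) := by
      rcases hb with hb | hb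
      · simp at hb
      · exact hb
    simp only [List.mem_map] at hb'
    obtain ⟨kb, _, rfl⟩ := hb'
    by_cases h1 : ka < kb
    · simp [h1]
    · by_cases h2 : kb < ka
      · simp [h2, not_lt_of_gt h2]
      · have : ka = kb := le_antisymm (not_lt.1 h2) (not_lt.1 h1)
        subst this
        simp
  rw [hstep]
  apply PySem.List.sorted_eq_of_perm_of_pairwise_lt
  · exact (PySem.List.sorted_perm (PySem.Set.ofList ids) (fun x => x) false).map _
  · exact (PySem.List.sorted_ofList_pairwise_lt ids).map _ (fun a b h => h)

-- skipping unrecognised items is a fold over the filterMap of the lookup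
lemma foldl_skip_none {σ δ : Type} (look : σ → Option Int) (g : δ → Int → δ) (l : List σ) :
    ∀ d : δ, l.foldl (fun d w => match look w with | none => d | some fid => g d fid) d
      = (l.filterMap look).foldl g d := by
  induction l with
  | nil => intro d; rfl
  | cons x l ih =>
    intro d
    simp only [List.foldl_cons, List.filterMap_cons]
    cases h : look x <;> simp [ih]

lemma get?_foldl_insert_one (ids : List Int) :
    ∀ (d : PySem.Dict Int Int) (k : Int),
      (ids.foldl (fun d x => d.insert x 1) d).get? k
        = if k ∈ ids then some 1 else d.get? k := by
  induction ids with
  | nil => intro d k; simp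
  | cons x ids ih =>
    intro d k
    simp only [List.foldl_cons, ih, PySem.Dict.get?_insert]
    by_cases hk : k ∈ ids
    · simp [hk]
    · by_cases hx : k = x <;> simp [hk, hx]

lemma items_foldl_insert_one (ids : List Int) :
    (ids.foldl (fun d x => d.insert x (1 : Int)) PySem.Dict.empty).items
      = (PySem.Set.ofList ids).map (fun k => (k, (1 : Int))) := by
  have hkeys : (ids.foldl (fun d x => d.insert x (1 : Int)) PySem.Dict.empty).keys
      = PySem.Set.ofList ids := by
    rw [PySem.Dict.keys_foldl_insert ids (fun _ _ => 1) _, PySem.Dict.keys_empty]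
    rfl
  have hnodup : (ids.foldl (fun d x => d.insert x (1 : Int)) PySem.Dict.empty).keys.Nodup :=
    PySem.Dict.nodup_keys_foldl_insert ids (fun _ _ => 1) _ PySem.Dict.nodup_keys_empty
  rw [PySem.Dict.items_eq_map_keys _ hnodup 0, hkeys]
  apply List.map_congr_left
  intro k hk
  have : k ∈ ids := (PySem.Set.mem_ofList ids k).1 hk
  rw [PySem.Dict.getD_eq_get?_getD, get?_foldl_insert_one ids PySem.Dict.empty k, if_pos this]
  rfl

-- A's whole pipeline, as a function of the recognised-id list (count mode)
lemma main_count (ids : List Int) :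
    PySem.List.sorted2 ((PySem.Dict.counter ids).items.foldl (fun acc p => acc ++ [p]) []) (·.1) (·.2)
      = (PySem.List.sorted (PySem.Set.ofList ids) (fun x => x) false).map
          (fun fid => (fid, (ids.count fid : Int))) := by
  rw [PySem.List.foldl_append_singleton, PySem.Dict.items_counter]
  exact sorted2_map_set ids (fun k => (ids.count k : Int))

-- A's whole pipeline, as a function of the recognised-id list (presence mode)
lemma main_presence (ids : List Int) :
    PySem.List.sorted2 ((ids.foldl (fun d x => d.insert x (1 : Int)) PySem.Dict.empty).items.foldl
        (fun acc p => acc ++ [p]) []) (·.1) (·.2)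
      = (PySem.List.sorted (PySem.Set.ofList ids) (fun x => x) false).map
          (fun fid => (fid, (1 : Int))) := by
  rw [PySem.List.foldl_append_singleton, items_foldl_insert_one]
  exact sorted2_map_set ids (fun _ => (1 : Int))

------------------------------------------------------------------ B-side

-- the value at key k that grouping a list p should produce
def groupVal (presence : Bool) (p : List Int) (k : Int) : Int :=
  if presence then 1 else (p.count k : Int)

-- the grouped form of a processed prefix p
def groupOf (presence : Bool) (p : List Int) : List (Int × Int) :=
  (PySem.Set.ofList p).map (fun k => (k, groupVal presence p k))

lemma ofList_sublist (xs : List Int) : List.Sublist (PySem.Set.ofList xs) xs := by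
  induction xs with
  | nil => simp [PySem.Set.ofList]
  | cons x xs ih =>
    rw [PySem.Set.ofList_cons]
    exact List.Sublist.cons₂ x (List.Sublist.trans (by simp [PySem.Set.discard]) ih)

lemma ofList_pairwise_le (xs : List Int) (h : xs.Pairwise (· ≤ ·)) :
    (PySem.Set.ofList xs).Pairwise (· ≤ ·) :=
  h.sublist (ofList_sublist xs)

lemma ofList_pairwise_lt (xs : List Int) (h : xs.Pairwise (· ≤ ·)) :
    (PySem.Set.ofList xs).Pairwise (· < ·) := by
  have hle := ofList_pairwise_le xs h
  have hne : (PySem.Set.ofList xs).Pairwise (· ≠ ·) := PySem.Set.nodup_ofList xs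
  exact (hle.and hne).imp (fun ⟨h1, h2⟩ => lt_of_le_of_ne h1 h2)

-- last element of Set.ofList p for sorted p bounds every element of p
lemma getLast?_ofList_bound (p : List Int) (h : p.Pairwise (· ≤ ·)) (L : Int)
    (hL : (PySem.Set.ofList p).getLast? = some L) :
    L ∈ p ∧ ∀ y ∈ p, y ≤ L := by
  have hmemL : L ∈ PySem.Set.ofList p := List.mem_of_getLast? hL
  have hLp : L ∈ p := (PySem.Set.mem_ofList p L).1 hmemL
  refine ⟨hLp, fun y hy => ?_⟩
  have hy' : y ∈ PySem.Set.ofList p := (PySem.Set.mem_ofList p y).2 hy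
  -- in a ≤-sorted list, the last element bounds all elements
  have hpw := ofList_pairwise_le p h
  rcases List.eq_nil_or_concat (PySem.Set.ofList p) with hnil | ⟨q, a, hqa⟩
  · simp [hnil] at hmemL
  · rw [List.concat_eq_append] at hqa
    rw [hqa] at hL hy' hpw
    have ha : a = L := by simpa using hL
    subst ha
    rcases List.mem_append.1 hy' with hm | hm
    · exact (List.pairwise_append.1 hpw).2.2 y hm a (by simp)
    · simp at hm; omega

lemma getLast?_map {α β : Type} (f : α → β) (l : List α) :
    (l.map f).getLast? = l.getLast?.map f := by
  rcases List.eq_nil_or_concat l with rfl | ⟨q, a, rfl⟩ <;> simp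

lemma dropLast_map {α β : Type} (f : α → β) (l : List α) :
    (l.map f).dropLast = l.dropLast.map f := by
  simp [List.dropLast_eq_take]

-- one step of B's grouping loop extends the grouped prefix by one element
lemma stepGroup_spec (presence : Bool) (p : List Int) (x : Int)
    (h : (p ++ [x]).Pairwise (· ≤ ·)) :
    stepGroup presence (groupOf presence p) x = groupOf presence (p ++ [x]) := by
  have hp : p.Pairwise (· ≤ ·) := (List.pairwise_append.1 h).1
  have hxge : ∀ y ∈ p, y ≤ x := fun y hy =>
    (List.pairwise_append.1 h).2.2 y hy x (by simp)
  unfold stepGroup groupOf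
  rw [getLast?_map]
  cases hL : (PySem.Set.ofList p).getLast? with
  | none =>
    -- p has no recognised element at all: Set.ofList p = [], hence p = []
    have hpempty : p = [] := by
      rcases List.eq_nil_or_concat (PySem.Set.ofList p) with hnil | ⟨q, a, hqa⟩
      · cases p with
        | nil => rfl
        | cons z t =>
          rw [PySem.Set.ofList_cons] at hnil
          simp at hnil
      · rw [hqa] at hL; simp at hL
    subst hpempty
    simp [PySem.Set.ofList, PySem.Set.add, PySem.Set.contains, groupVal]
  | some L =>
    obtain ⟨hLmem, hLmax⟩ := getLast?_ofList_bound p hp L hL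
    simp only [Option.map_some]
    by_cases hxL : L = x
    · subst hxL
      -- x already occurs in p: the key list is unchanged, only the last count grows
      have hset : PySem.Set.ofList (p ++ [L]) = PySem.Set.ofList p := by
        rw [PySem.Set.ofList_append_singleton, PySem.Set.add]
        simp [PySem.Set.contains, PySem.Set.mem_ofList, hLmem]
      cases presence with
      | true => simp [hset, groupVal]
      | false =>
        simp only [beq_self_eq_true, if_true, Bool.false_eq_true, if_false, hset]
        -- split Set.ofList p as q ++ [L]
        rcases List.eq_nil_or_concat (PySem.Set.ofList p) with hnil | ⟨q, a, hqa⟩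
        · rw [hnil] at hL; simp at hL
        · rw [List.concat_eq_append] at hqa
          have ha : a = L := by rw [hqa] at hL; simpa using hL
          subst ha
          have hnodup : (q ++ [a]).Nodup := by rw [← hqa]; exact PySem.Set.nodup_ofList p
          rw [hqa, dropLast_map, List.dropLast_concat, List.map_append]
          congr 1
          · apply List.map_congr_left
            intro k hk
            have hkL : k ≠ a := by
              intro hkL; subst hkL
              have := List.disjoint_of_nodup_append hnodup
              exact this hk (by simp)
            simp [groupVal, List.count_append, Ne.symm hkL]
          · simp [groupVal, List.count_append]
    · -- x is a new, strictly larger key: append a fresh (x, 1) pair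
      have hxnotp : x ∉ p := by
        intro hx
        exact hxL (le_antisymm (hxge L hLmem) (hLmax x hx))
      have hset : PySem.Set.ofList (p ++ [x]) = PySem.Set.ofList p ++ [x] := by
        rw [PySem.Set.ofList_append_singleton, PySem.Set.add]
        simp [PySem.Set.contains, PySem.Set.mem_ofList, hxnotp]
      have hbeq : (L == x) = false := by simp [hxL]
      simp only [hbeq, Bool.false_eq_true, if_false, hset, List.map_append, List.map_cons,
        List.map_nil]
      congr 1
      · apply List.map_congr_left
        intro k hk
        have hkx : k ≠ x := by
          intro hkx; subst hkx
          exact hxnotp ((PySem.Set.mem_ofList p k).1 hk)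
        simp [groupVal, List.count_append, Ne.symm hkx]
      · simp [groupVal, List.count_append, List.count_eq_zero_of_not_mem hxnotp]

-- B's grouping loop over a ≤-sorted list produces the grouped form
lemma foldl_stepGroup (presence : Bool) (s : List Int) :
    ∀ p : List Int, (p ++ s).Pairwise (· ≤ ·) →
      s.foldl (stepGroup presence) (groupOf presence p) = groupOf presence (p ++ s) := by
  induction s with
  | nil => intro p _; simp
  | cons x s ih =>
    intro p h
    have h' : ((p ++ [x]) ++ s).Pairwise (· ≤ ·) := by
      simpa [List.append_assoc] using h
    have h1 : (p ++ [x]).Pairwise (· ≤ ·) := (List.pairwise_append.1 h').1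
    simp only [List.foldl_cons]
    rw [stepGroup_spec presence p x h1, ih (p ++ [x]) h']
    simp [List.append_assoc]

-- B's whole pipeline as a function of the recognised-id list
lemma alt_main (presence : Bool) (ids : List Int) :
    (PySem.List.sorted ids (fun x => x) false).foldl (stepGroup presence) []
      = (PySem.List.sorted (PySem.Set.ofList ids) (fun x => x) false).map
          (fun fid => (fid, groupVal presence ids fid)) := by
  set s := PySem.List.sorted ids (fun x => x) false with hs
  have hsort : s.Pairwise (· ≤ ·) := PySem.List.sorted_pairwise ids (fun x => x)
  have hperm : s.Perm ids := PySem.List.sorted_perm ids (fun x => x) false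
  have hfold : s.foldl (stepGroup presence) [] = groupOf presence s := by
    have h0 : groupOf presence ([] : List Int) = [] := by
      simp [groupOf, PySem.Set.ofList]
    rw [← h0]
    simpa using foldl_stepGroup presence s [] (by simpa using hsort)
  rw [hfold]
  -- identify Set.ofList s with the sorted distinct ids, and count s with count ids
  have hset : PySem.List.sorted (PySem.Set.ofList ids) (fun x => x) false
      = PySem.Set.ofList s := by
    apply PySem.List.sorted_eq_of_perm_of_pairwise_lt
    · rw [List.perm_ext_iff_of_nodup (PySem.Set.nodup_ofList s) (PySem.Set.nodup_ofList ids)]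
      intro a
      rw [PySem.Set.mem_ofList, PySem.Set.mem_ofList]
      exact ⟨fun ha => hperm.mem_iff.1 ha, fun ha => hperm.mem_iff.2 ha⟩
    · exact ofList_pairwise_lt s hsort
  rw [hset]
  unfold groupOf
  apply List.map_congr_left
  intro k _
  simp [groupVal, hperm.count_eq]

-- A and B zip against the same bigram stream: dropLast vs the full list, truncated by tail
lemma zip_dropLast_tail {α : Type} (l : List α) :
    l.dropLast.zip l.tail = l.zip l.tail := by
  induction l with
  | nil => rfl
  | cons x t ih =>
    cases t with
    | nil => rfl
    | cons y t' => simpa using ih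

-- ===== VERDICT (by name: the statement is the Claim_ definition above) =====
theorem getDocumentVector_spec : Claim_equal_getDocumentVector := by
  intro wordList wordMap unigrams bigrams presence _
  unfold Spec_getDocumentVector getDocumentVector getDocumentVector_alt
  simp only [PySem.List.slice_to_neg_one, PySem.List.slice_from_one, zip_dropLast_tail]
  cases presence with
  | true =>
    simp only [if_true, foldl_skip_none]
    cases unigrams <;> cases bigrams <;>
      simp only [Bool.false_eq_true, if_true, if_false,
        List.append_nil, List.nil_append]
    · refine (main_presence []).trans ?_; rw [alt_main]; simp [groupVal]
    · rw [main_presence, alt_main]; simp [groupVal]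
    · rw [main_presence, alt_main]; simp [groupVal]
    · rw [← List.foldl_append, main_presence, alt_main]; simp [groupVal]
  | false =>
    simp only [Bool.false_eq_true, if_false, foldl_skip_none]
    cases unigrams <;> cases bigrams <;>
      simp only [Bool.false_eq_true, if_true, if_false,
        List.append_nil, List.nil_append, ← PySem.Dict.counter_eq_foldl]
    · refine (main_count []).trans ?_; rw [alt_main]; simp [groupVal]
    · rw [main_count, alt_main]; simp [groupVal]
    · rw [main_count, alt_main]; simp [groupVal]
    · rw [PySem.Dict.counter_eq_foldl, ← List.foldl_append, ← PySem.Dict.counter_eq_foldl]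
      rw [main_count, alt_main]; simp [groupVal]
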